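-- pv_equiv track=rewrite | github.com/gentralg-Gitcoding/First_Dungeon_Last_Stand | game/engine/map_generator.py | enforce_reachable_door
-- ===== SOURCE A (Python) =====
-- FLOOR = 1
--
-- DOOR = 2
--
-- def enforce_reachable_door(matrix):
--     height = len(matrix)
--     width = len(matrix[0])
--
--     for y in range(height):
--         for x in range(width):
--
--             # Check if tile is a door
--             if matrix[y][x] == DOOR:
--
--                 # TOP EDGE
--                 if y == 0:
--                     if y + 1 < height:
--                         matrix[y + 1][x] = FLOOR
--
--                 # BOTTOM EDGE
--                 elif y == height - 1:
--                     if y - 1 >= 0: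
--                         matrix[y - 1][x] = FLOOR
--
--                 # LEFT EDGE
--                 elif x == 0:
--                     if x + 1 < width:
--                         matrix[y][x + 1] = FLOOR
--
--                 # RIGHT EDGE
--                 elif x == width - 1:
--                     if x - 1 >= 0:
--                         matrix[y][x - 1] = FLOOR
--
--     return matrix
-- ===== SOURCE B (Python) =====
-- FLOOR = 1
--
-- DOOR = 2
--
-- def enforce_reachable_door(matrix):
--     # Three border sweeps (top row, interior left/right columns, bottom row)
--     # in A's row order, instead of a full-grid scan. Mutates matrix in place like A.
--     height = len(matrix)
--     width = len(matrix[0])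
--     if height > 1:
--         for x in range(width):
--             if matrix[0][x] == DOOR:
--                 matrix[1][x] = FLOOR
--     for y in range(1, height - 1):
--         if width > 1 and matrix[y][0] == DOOR:
--             matrix[y][1] = FLOOR
--         if width > 1 and matrix[y][width - 1] == DOOR:
--             matrix[y][width - 2] = FLOOR
--     if height > 1:
--         for x in range(width):
--             if matrix[height - 1][x] == DOOR:
--                 matrix[height - 2][x] = FLOOR
--     return matrix
-- ===== Notes on version B (the rewrite author's own statement) =====
-- stated objective: alternative
-- what changed: Replaces A's full-grid nested scan over every cell with three targeted border sweeps (top row, interior rows' left/right columns, bottom row) in A's row order, so interior cells are never inspected.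
import Mathlib
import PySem

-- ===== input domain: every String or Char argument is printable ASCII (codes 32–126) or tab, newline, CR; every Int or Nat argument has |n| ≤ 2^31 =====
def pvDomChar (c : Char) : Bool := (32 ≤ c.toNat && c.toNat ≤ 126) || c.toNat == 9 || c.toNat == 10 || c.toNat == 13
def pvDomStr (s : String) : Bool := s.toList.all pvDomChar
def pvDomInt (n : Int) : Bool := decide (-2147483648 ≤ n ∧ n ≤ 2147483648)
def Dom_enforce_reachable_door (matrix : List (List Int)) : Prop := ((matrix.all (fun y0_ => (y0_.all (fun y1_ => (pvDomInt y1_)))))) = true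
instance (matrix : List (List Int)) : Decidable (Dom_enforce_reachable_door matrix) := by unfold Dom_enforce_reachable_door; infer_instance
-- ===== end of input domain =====

-- B replaces A's full-grid nested scan with three border sweeps (top row, interior
-- left/right columns, bottom row) in A's row order; both mutate the matrix in place in
-- Python — the equivalence proved here is about the returned value.

-- shared cell access: Python's matrix[y][x] read / write (in range under Pre_)
def pvGetCell (m : List (List Int)) (y x : Nat) : Int := (m.getD y []).getD x 0

def pvSetCell (m : List (List Int)) (y x : Nat) (v : Int) : List (List Int) :=
  m.set y ((m.getD y []).set x v)

-- ===== PORT A =====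
def enforce_reachable_door (matrix : List (List Int)) : List (List Int) :=
  let height := matrix.length
  let width := (matrix.headD []).length
  (List.range height).foldl (fun m y =>
    (List.range width).foldl (fun m x =>
      if pvGetCell m y x = 2 then            -- matrix[y][x] == DOOR
        if y = 0 then                        -- TOP EDGE
          if y + 1 < height then pvSetCell m (y + 1) x 1 else m
        else if y = height - 1 then          -- BOTTOM EDGE (y - 1 >= 0 always holds: y ≥ 1 here)
          pvSetCell m (y - 1) x 1
        else if x = 0 then                   -- LEFT EDGE
          if x + 1 < width then pvSetCell m y (x + 1) 1 else m
        else if x = width - 1 then           -- RIGHT EDGE (x - 1 >= 0 always holds: x ≥ 1 here)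
          pvSetCell m y (x - 1) 1
        else m
      else m) m) matrix

-- ===== PORT B =====
-- the three sweeps of Source B
def pvTopSweep (width : Nat) (m0 : List (List Int)) : List (List Int) :=
  (List.range width).foldl (fun m x =>
    if pvGetCell m 0 x = 2 then pvSetCell m 1 x 1 else m) m0

def pvRowSweep (width : Nat) (m0 : List (List Int)) (y : Nat) : List (List Int) :=
  let m1 := if 1 < width ∧ pvGetCell m0 y 0 = 2 then pvSetCell m0 y 1 1 else m0
  if 1 < width ∧ pvGetCell m1 y (width - 1) = 2 then pvSetCell m1 y (width - 2) 1 else m1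

def pvBottomSweep (height width : Nat) (m0 : List (List Int)) : List (List Int) :=
  (List.range width).foldl (fun m x =>
    if pvGetCell m (height - 1) x = 2 then pvSetCell m (height - 2) x 1 else m) m0

def enforce_reachable_door_alt (matrix : List (List Int)) : List (List Int) :=
  let height := matrix.length
  let width := (matrix.headD []).length
  let m1 := if 1 < height then pvTopSweep width matrix else matrix
  let m2 := (List.range' 1 (height - 2)).foldl (pvRowSweep width) m1   -- for y in range(1, height-1)
  if 1 < height then pvBottomSweep height width m2 else m2

-- ===== PRECONDITION & SPEC =====
-- Pre_ excludes exactly the inputs where Python A raises IndexError: the empty matrix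
-- (len(matrix[0])) and ragged matrices with a row shorter than row 0.
def Pre_enforce_reachable_door (matrix : List (List Int)) : Prop :=
  matrix ≠ [] ∧ ∀ row ∈ matrix, (matrix.headD []).length ≤ row.length

instance (matrix : List (List Int)) : Decidable (Pre_enforce_reachable_door matrix) := by
  unfold Pre_enforce_reachable_door; infer_instance

def pvWitness_enforce_reachable_door : List (List Int) := [[2, 0, 2], [0, 0, 2], [0, 2, 0]]

def Spec_enforce_reachable_door (matrix : List (List Int)) (out : List (List Int)) : Prop := out = enforce_reachable_door_alt matrix
instance (matrix : List (List Int)) (out : List (List Int)) : Decidable (Spec_enforce_reachable_door matrix out) := by unfold Spec_enforce_reachable_door; infer_instance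

-- ===== CLAIM (what is proved, stated in full; the proofs are below) =====
def Claim_equal_enforce_reachable_door : Prop := ∀ (matrix : List (List Int)), Dom_enforce_reachable_door matrix → Pre_enforce_reachable_door matrix → Spec_enforce_reachable_door matrix (enforce_reachable_door matrix)

-- ===== LEMMAS AND PROOFS =====

-- a fold whose step fixes the accumulator on every list element is the identity
theorem pv_foldl_id {α β : Type} (l : List β) (f : α → β → α) (m : α)
    (h : ∀ m x, x ∈ l → f m x = m) : l.foldl f m = m := by
  induction l generalizing m with
  | nil => rfl
  | cons a t ih =>
      simp only [List.foldl_cons, h m a (List.mem_cons_self), ih _ (fun m x hx => h m x (List.mem_cons_of_mem _ hx))]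

-- congruence of foldl under pointwise equality on the list's elements
theorem pv_foldl_congr {α β : Type} (l : List β) (f g : α → β → α) (m : α)
    (h : ∀ m x, x ∈ l → f m x = g m x) : l.foldl f m = l.foldl g m := by
  induction l generalizing m with
  | nil => rfl
  | cons a t ih =>
      simp only [List.foldl_cons, h m a (List.mem_cons_self)]
      exact ih _ (fun m x hx => h m x (List.mem_cons_of_mem _ hx))

-- A's inner pass over an interior row y equals B's pvRowSweep
theorem pv_row_eq (h w y : Nat) (m : List (List Int)) (hh : 2 ≤ h) (hy1 : 1 ≤ y) (hy2 : y ≤ h - 2) :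
    (List.range w).foldl (fun m x =>
      if pvGetCell m y x = 2 then
        if y = 0 then
          if y + 1 < h then pvSetCell m (y + 1) x 1 else m
        else if y = h - 1 then
          pvSetCell m (y - 1) x 1
        else if x = 0 then
          if x + 1 < w then pvSetCell m y (x + 1) 1 else m
        else if x = w - 1 then
          pvSetCell m y (x - 1) 1
        else m
      else m) m = pvRowSweep w m y := by
  have hy0 : y ≠ 0 := by omega
  have hyh : y ≠ h - 1 := by omega
  rcases Nat.lt_or_ge w 2 with hw | hw
  · -- w = 0 or w = 1: both sides are the identity
    have hid : (List.range w).foldl (fun m x =>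
      if pvGetCell m y x = 2 then
        if y = 0 then
          if y + 1 < h then pvSetCell m (y + 1) x 1 else m
        else if y = h - 1 then
          pvSetCell m (y - 1) x 1
        else if x = 0 then
          if x + 1 < w then pvSetCell m y (x + 1) 1 else m
        else if x = w - 1 then
          pvSetCell m y (x - 1) 1
        else m
      else m) m = m := by
      apply pv_foldl_id
      intro m x hx
      have hxw : x < w := List.mem_range.mp hx
      have hx0 : x = 0 := by omega
      simp [hx0, hy0, hyh]
      omega
    rw [hid]
    unfold pvRowSweep
    have : ¬ (1 < w) := by omega
    simp [this]
  · -- w ≥ 2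
    have hw1 : (w - 2) + 1 + 1 = w := by omega
    have hw3 : w - 2 + 1 = w - 1 := by omega
    have hrange : List.range w = (0 :: (List.range (w - 2)).map (· + 1)) ++ [w - 1] := by
      conv_lhs => rw [← hw1, List.range_succ, List.range_succ_eq_map]
      simp [hw3]
    rw [hrange, List.foldl_append, List.foldl_cons, List.foldl_cons, List.foldl_nil, List.foldl_map]
    -- first step: x = 0
    have h0 : (if pvGetCell m y 0 = 2 then
        if y = 0 then
          if y + 1 < h then pvSetCell m (y + 1) 0 1 else m
        else if y = h - 1 then
          pvSetCell m (y - 1) 0 1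
        else if (0 : Nat) = 0 then
          if 0 + 1 < w then pvSetCell m y (0 + 1) 1 else m
        else if (0 : Nat) = w - 1 then
          pvSetCell m y (0 - 1) 1
        else m
      else m) = (if 1 < w ∧ pvGetCell m y 0 = 2 then pvSetCell m y 1 1 else m) := by
      have : (0 : Nat) + 1 < w := by omega
      simp [hy0, hyh, this]
    rw [h0]
    -- middle steps (interior columns) are identity
    have hmid : ∀ (m' : List (List Int)) i, i ∈ List.range (w - 2) →
        (fun m x =>
          if pvGetCell m y x = 2 then
            if y = 0 then
              if y + 1 < h then pvSetCell m (y + 1) x 1 else m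
            else if y = h - 1 then
              pvSetCell m (y - 1) x 1
            else if x = 0 then
              if x + 1 < w then pvSetCell m y (x + 1) 1 else m
            else if x = w - 1 then
              pvSetCell m y (x - 1) 1
            else m
          else m) m' (i + 1) = m' := by
      intro m' i hi
      have hiw : i < w - 2 := List.mem_range.mp hi
      have h1 : i + 1 ≠ 0 := by omega
      have h2 : i + 1 ≠ w - 1 := by omega
      simp [hy0, hyh, h2]
    rw [pv_foldl_id _ _ _ hmid]
    -- last step: x = w - 1
    have hne : w - 1 ≠ 0 := by omega
    unfold pvRowSweep
    have h1w : 1 < w := by omega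
    have hsub : w - 1 - 1 = w - 2 := by omega
    simp [hy0, hyh, hne, h1w, hsub]

-- main equivalence, unconditionally on all inputs
theorem pv_main (matrix : List (List Int)) :
    enforce_reachable_door matrix = enforce_reachable_door_alt matrix := by
  unfold enforce_reachable_door enforce_reachable_door_alt
  simp only []
  set h := matrix.length with hh
  set w := (matrix.headD []).length with hw
  rcases Nat.lt_or_ge h 2 with hlt | hge
  · -- h = 0 or h = 1: both sides are matrix
    have hB : ¬ (1 < h) := by omega
    have hmid0 : h - 2 = 0 := by omega
    have hA : (List.range h).foldl (fun m y =>
        (List.range w).foldl (fun m x =>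
          if pvGetCell m y x = 2 then
            if y = 0 then
              if y + 1 < h then pvSetCell m (y + 1) x 1 else m
            else if y = h - 1 then
              pvSetCell m (y - 1) x 1
            else if x = 0 then
              if x + 1 < w then pvSetCell m y (x + 1) 1 else m
            else if x = w - 1 then
              pvSetCell m y (x - 1) 1
            else m
          else m) m) matrix = matrix := by
      apply pv_foldl_id
      intro m y hy
      have hyh : y < h := List.mem_range.mp hy
      have hy0 : y = 0 := by omega
      apply pv_foldl_id
      intro m' x hx
      have : ¬ (y + 1 < h) := by omega
      simp [hy0] at this ⊢
      omega
    rw [hA]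
    simp [hB, hmid0]
  · -- h ≥ 2
    have hB : (1 < h) := by omega
    have hdec : List.range h = (0 :: (List.range (h - 2)).map (· + 1)) ++ [h - 1] := by
      have h1 : (h - 2) + 1 + 1 = h := by omega
      have h3 : h - 2 + 1 = h - 1 := by omega
      conv_lhs => rw [← h1, List.range_succ, List.range_succ_eq_map]
      simp [h3]
    rw [hdec, List.foldl_append, List.foldl_cons, List.foldl_cons, List.foldl_nil, List.foldl_map]
    conv_rhs => rw [if_pos hB, if_pos hB]
    -- top row pass = pvTopSweep
    have htop : (List.range w).foldl (fun m x =>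
        if pvGetCell m 0 x = 2 then
          if (0 : Nat) = 0 then
            if 0 + 1 < h then pvSetCell m (0 + 1) x 1 else m
          else if (0 : Nat) = h - 1 then
            pvSetCell m (0 - 1) x 1
          else if x = 0 then
            if x + 1 < w then pvSetCell m 0 (x + 1) 1 else m
          else if x = w - 1 then
            pvSetCell m 0 (x - 1) 1
          else m
        else m) matrix = pvTopSweep w matrix := by
      unfold pvTopSweep
      apply pv_foldl_congr
      intro m x _
      simp [hB]
    rw [htop]
    -- interior rows = fold of pvRowSweep over range' 1 (h-2)
    have hinterior : ∀ (m0 : List (List Int)),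
        (List.range (h - 2)).foldl (fun m i =>
          (List.range w).foldl (fun m x =>
            if pvGetCell m (i + 1) x = 2 then
              if i + 1 = 0 then
                if i + 1 + 1 < h then pvSetCell m (i + 1 + 1) x 1 else m
              else if i + 1 = h - 1 then
                pvSetCell m (i + 1 - 1) x 1
              else if x = 0 then
                if x + 1 < w then pvSetCell m (i + 1) (x + 1) 1 else m
              else if x = w - 1 then
                pvSetCell m (i + 1) (x - 1) 1
              else m
            else m) m) m0
        = (List.range' 1 (h - 2)).foldl (pvRowSweep w) m0 := by
      intro m0
      rw [List.range'_eq_map_range, List.foldl_map]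
      apply pv_foldl_congr
      intro m i hi
      have hiw : i < h - 2 := List.mem_range.mp hi
      have := pv_row_eq h w (i + 1) m hge (by omega) (by omega)
      rw [Nat.add_comm 1 i]
      exact this
    rw [hinterior]
    -- bottom row pass = pvBottomSweep
    unfold pvBottomSweep
    apply pv_foldl_congr
    intro m x _
    have h1 : h - 1 ≠ 0 := by omega
    have h2 : h - 1 - 1 = h - 2 := by omega
    simp [h1, h2]

-- ===== VERDICT (by name: the statement is the Claim_ definition above) =====
theorem enforce_reachable_door_spec : Claim_equal_enforce_reachable_door := by
  intro matrix _ _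
  unfold Spec_enforce_reachable_door
  exact pv_main matrix
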